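-- pv_equiv track=rewrite | github.com/jetzypetz/python | Tutorial_3/stats.py | discard_scores
-- ===== SOURCE A (Python) =====
-- def discard_scores(numlist):
--     numlist = numlist[2:]
--     for j in range(2):
--         lowest = numlist[0]
--         for i in numlist:
--             if i < lowest:
--                 lowest = i
--         numlist.remove(lowest)
--     return numlist
-- ===== SOURCE B (Python) =====
-- def discard_scores(numlist):
--     scores = numlist[2:]
--     # seed with the first two (value, index) keys, in lexicographic order
--     if (scores[1], 1) < (scores[0], 0):
--         (v1, i1), (v2, i2) = (scores[1], 1), (scores[0], 0)
--     else:
--         (v1, i1), (v2, i2) = (scores[0], 0), (scores[1], 1)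
--     # one pass: keep the two lexicographically smallest (value, index) keys
--     for i, v in enumerate(scores):
--         if i >= 2:
--             if (v, i) < (v1, i1):
--                 (v1, i1), (v2, i2) = (v, i), (v1, i1)
--             elif (v, i) < (v2, i2):
--                 (v2, i2) = (v, i)
--     return [x for i, x in enumerate(scores) if i != i1 and i != i2]
-- ===== Notes on version B (the rewrite author's own statement) =====
-- stated objective: alternative
-- what changed: A repeats two scan-for-minimum passes each followed by list.remove; B makes a single pass keeping the two lexicographically smallest (value, index) keys and then filters those two positions out in one comprehension, never mutating the list.
import Mathlib
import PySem

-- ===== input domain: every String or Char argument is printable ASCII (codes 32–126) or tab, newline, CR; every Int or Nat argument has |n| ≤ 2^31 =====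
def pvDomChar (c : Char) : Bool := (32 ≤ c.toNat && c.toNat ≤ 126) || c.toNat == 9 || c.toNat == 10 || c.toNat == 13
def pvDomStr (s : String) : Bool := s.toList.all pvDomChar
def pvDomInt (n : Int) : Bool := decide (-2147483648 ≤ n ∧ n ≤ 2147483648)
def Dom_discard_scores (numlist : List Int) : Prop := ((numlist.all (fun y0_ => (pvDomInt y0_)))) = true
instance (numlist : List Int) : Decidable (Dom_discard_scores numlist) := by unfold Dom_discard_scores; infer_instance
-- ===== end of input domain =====

-- B replaces A's two scan-for-minimum-then-remove passes by one pass keeping the two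
-- lexicographically smallest (value, index) keys and a final filter (objective: alternative).

-- ===== PORT A =====
def dsMin (lo i : Int) : Int := if i < lo then i else lo

-- one iteration of A's outer loop: lowest = numlist[0]; scan; numlist.remove(lowest)
def dsStep (nl : List Int) : Option (List Int) :=
  match PySem.List.pyGet? nl 0 with
  | none => none                                   -- IndexError on numlist[0]
  | some l0 => PySem.List.remove? nl (nl.foldl dsMin l0)

def discard_scores (numlist : List Int) : List Int :=
  -- A raises IndexError when numlist[2:] has fewer than 2 elements; Pre_ excludes
  -- exactly those inputs, so the `.getD []` default is never reached under Pre_.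
  (((PySem.List.pyRange 0 2 1).foldl (fun acc _ => acc.bind dsStep)
      (some (PySem.List.slice numlist (some 2) none))).getD [])

-- ===== PORT B =====
-- Python tuple comparison (v, i) < (w, j): exact lexicographic semantics
def dsKeyLt (p q : Int × Int) : Bool := p.1 < q.1 || (p.1 == q.1 && p.2 < q.2)

-- body of B's loop on the key k = (v, i) (with the `if i >= 2` guard)
def dsUpd (st : (Int × Int) × (Int × Int)) (k : Int × Int) : (Int × Int) × (Int × Int) :=
  if 2 ≤ k.2 then
    if dsKeyLt k st.1 then (k, st.1)
    else if dsKeyLt k st.2 then (st.1, k)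
    else st
  else st

def discard_scores_alt (numlist : List Int) : List Int :=
  let scores := PySem.List.slice numlist (some 2) none
  match PySem.List.pyGet? scores 0, PySem.List.pyGet? scores 1 with
  | some a, some b =>
    let init := if dsKeyLt (b, 1) (a, 0) then ((b, (1:Int)), (a, (0:Int)))
                else ((a, (0:Int)), (b, (1:Int)))
    let st := (PySem.List.enumerate scores 0).foldl (fun st p => dsUpd st (p.2, p.1)) init
    ((PySem.List.enumerate scores 0).filter
        (fun p => p.1 != st.1.2 && p.1 != st.2.2)).map Prod.snd
  | _, _ => []                                     -- IndexError on scores[0]/scores[1]; outside Pre_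

-- ===== PRECONDITION & SPEC =====
-- Pre_ excludes exactly the inputs on which A raises IndexError: fewer than 2 scores
-- remain after dropping the first two (both Pythons raise there).
def Pre_discard_scores (numlist : List Int) : Prop := 4 ≤ numlist.length
instance (numlist : List Int) : Decidable (Pre_discard_scores numlist) := by
  unfold Pre_discard_scores; infer_instance
def pvWitness_discard_scores : List Int := ([5, 7, 3, 9, 1, 3])

def Spec_discard_scores (numlist : List Int) (out : List Int) : Prop := out = discard_scores_alt numlist
instance (numlist : List Int) (out : List Int) : Decidable (Spec_discard_scores numlist out) := by unfold Spec_discard_scores; infer_instance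

-- ===== CLAIM (what is proved, stated in full; the proofs are below) =====
def Claim_equal_discard_scores : Prop := ∀ (numlist : List Int), Dom_discard_scores numlist → Pre_discard_scores numlist → Spec_discard_scores numlist (discard_scores numlist)

-- ===== LEMMAS AND PROOFS =====

-- Prop form of the key order
def vLt (p q : Int × Int) : Prop := p.1 < q.1 ∨ (p.1 = q.1 ∧ p.2 < q.2)

theorem dsKeyLt_iff (p q : Int × Int) : dsKeyLt p q = true ↔ vLt p q := by
  simp [dsKeyLt, vLt]

theorem vLt_irrefl (p : Int × Int) : ¬ vLt p p := by
  simp [vLt]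

theorem vLt_trans {p q r : Int × Int} (h1 : vLt p q) (h2 : vLt q r) : vLt p r := by
  rcases h1 with h1 | ⟨h1, h1'⟩ <;> rcases h2 with h2 | ⟨h2, h2'⟩ <;>
    simp [vLt] <;> omega

theorem vLt_total {p q : Int × Int} (h : p ≠ q) (h2 : ¬ vLt p q) : vLt q p := by
  rcases p with ⟨a, b⟩; rcases q with ⟨c, d⟩
  simp [vLt] at h2 ⊢
  by_cases hac : a = c
  · subst hac
    have : b ≠ d := by simpa [Prod.ext_iff] using h
    omega
  · omega

-- the invariant of B's fold: st holds the two vLt-least keys seen so far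
def dsInv (P : List (Int × Int)) (st : (Int × Int) × (Int × Int)) : Prop :=
  st.1 ∈ P ∧ st.2 ∈ P ∧ vLt st.1 st.2 ∧ ∀ q ∈ P, q ≠ st.1 → q ≠ st.2 → vLt st.2 q

theorem inv_step {P : List (Int × Int)} {st : (Int × Int) × (Int × Int)} {k : Int × Int}
    (hP : dsInv P st) (hk2 : 2 ≤ k.2) (hkP : k ∉ P) : dsInv (P ++ [k]) (dsUpd st k) := by
  obtain ⟨h1, h2, h12, hmin⟩ := hP
  have hk1 : k ≠ st.1 := fun h => hkP (h ▸ h1)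
  have hk2' : k ≠ st.2 := fun h => hkP (h ▸ h2)
  unfold dsUpd
  rw [if_pos hk2]
  by_cases c1 : dsKeyLt k st.1 = true
  · rw [if_pos c1]
    have hlt : vLt k st.1 := (dsKeyLt_iff _ _).1 c1
    refine ⟨by simp, by simp [h1], hlt, ?_⟩
    intro q hq hq1 hq2
    rcases List.mem_append.1 hq with hq | hq
    · by_cases hq3 : q = st.2
      · exact hq3 ▸ h12
      · exact vLt_trans h12 (hmin q hq hq2 hq3)
    · simp at hq; exact absurd hq hq1
  · rw [if_neg c1]
    have hlt1 : vLt st.1 k := vLt_total hk1 (by simpa [dsKeyLt_iff] using c1)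
    by_cases c2 : dsKeyLt k st.2 = true
    · rw [if_pos c2]
      have hlt2 : vLt k st.2 := (dsKeyLt_iff _ _).1 c2
      refine ⟨by simp [h1], by simp, hlt1, ?_⟩
      intro q hq hq1 hq2
      rcases List.mem_append.1 hq with hq | hq
      · by_cases hq3 : q = st.2
        · exact hq3 ▸ hlt2
        · exact vLt_trans hlt2 (hmin q hq hq1 hq3)
      · simp at hq; exact absurd hq hq2
    · rw [if_neg c2]
      have hlt2 : vLt st.2 k := vLt_total hk2' (by simpa [dsKeyLt_iff] using c2)
      refine ⟨by simp [h1], by simp [h2], h12, ?_⟩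
      intro q hq hq1 hq2
      rcases List.mem_append.1 hq with hq | hq
      · exact hmin q hq hq1 hq2
      · simp at hq; exact hq ▸ hlt2

theorem inv_fold : ∀ (R P : List (Int × Int)) (st : (Int × Int) × (Int × Int)),
    (P ++ R).Pairwise (fun p q => p.2 ≠ q.2) → dsInv P st → (∀ k ∈ R, 2 ≤ k.2) →
    dsInv (P ++ R) (R.foldl dsUpd st)
  | [], P, st, _, hI, _ => by simpa using hI
  | k :: R', P, st, hpw, hI, hk2 => by
    have hkP : k ∉ P := by
      intro hk
      have := (List.pairwise_append.1 hpw).2.2 k hk k (by simp)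
      exact this rfl
    have step := inv_step hI (hk2 k (by simp)) hkP
    have hpw' : ((P ++ [k]) ++ R').Pairwise (fun p q => p.2 ≠ q.2) := by
      simpa [List.append_assoc] using hpw
    have := inv_fold R' (P ++ [k]) (dsUpd st k) hpw' step
      (fun x hx => hk2 x (by simp [hx]))
    simpa [List.append_assoc] using this
  termination_by R => R.length

-- the strict vLt-minimum of a key list
def KMin (K : List (Int × Int)) (p : Int × Int) : Prop :=
  p ∈ K ∧ ∀ q ∈ K, q ≠ p → vLt p q

theorem KMin_le_fst {K : List (Int × Int)} {p : Int × Int} (h : KMin K p) :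
    ∀ q ∈ K, p.1 ≤ q.1 := by
  intro q hq
  by_cases hqp : q = p
  · simp [hqp]
  · rcases h.2 q hq hqp with h' | ⟨h', _⟩ <;> omega

theorem foldl_dsMin_mem : ∀ (l : List Int) (x : Int), l.foldl dsMin x ∈ x :: l
  | [], x => by simp
  | y :: t, x => by
    have := foldl_dsMin_mem t (dsMin x y)
    by_cases h : y < x <;> simp [dsMin, h] at this ⊢ <;> tauto

theorem foldl_dsMin_le : ∀ (l : List Int) (x : Int), ∀ y ∈ x :: l, l.foldl dsMin x ≤ y
  | [], x => by simp
  | z :: t, x => by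
    intro y hy
    have ih := foldl_dsMin_le t (dsMin x z)
    have hle : dsMin x z ≤ x ∧ dsMin x z ≤ z := by unfold dsMin; split <;> omega
    have hres : t.foldl dsMin (dsMin x z) ≤ dsMin x z := ih _ (by simp)
    simp at hy
    rcases hy with rfl | rfl | hy
    · simpa using le_trans hres hle.1
    · simpa using le_trans hres hle.2
    · simpa using ih y (by simp [hy])

-- A's inner scan computes the minimum value, which is the first component of the vLt-minimum
theorem foldl_eq_minval {K : List (Int × Int)} {p : Int × Int} (hK : KMin K p)
    (x : Int) (hx : x ∈ K.map Prod.fst) :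
    (K.map Prod.fst).foldl dsMin x = p.1 := by
  have hp1 : p.1 ∈ K.map Prod.fst := List.mem_map_of_mem hK.1
  apply le_antisymm
  · exact foldl_dsMin_le _ x p.1 (List.mem_cons_of_mem _ hp1)
  · have hm := foldl_dsMin_mem (K.map Prod.fst) x
    have hm' : (K.map Prod.fst).foldl dsMin x ∈ K.map Prod.fst := by
      rcases List.mem_cons.1 hm with h | h
      · rw [h]; exact hx
      · exact h
    rcases List.mem_map.1 hm' with ⟨q, hq, hq'⟩
    exact hq' ▸ KMin_le_fst hK q hq

-- removing the first occurrence of the minimum value = dropping the vLt-minimum key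
theorem erase_minval : ∀ (K : List (Int × Int)) (p : Int × Int), KMin K p →
    K.Pairwise (fun a b => a.2 < b.2) →
    (K.map Prod.fst).erase p.1 = (K.filter (fun k => k.2 != p.2)).map Prod.fst
  | [], p, hK, _ => by simp [KMin] at hK
  | q :: K', p, hK, hpw => by
    by_cases hqp : q = p
    · subst hqp
      have hne : ∀ r ∈ K', r.2 ≠ q.2 := by
        intro r hr
        exact (ne_of_lt ((List.pairwise_cons.1 hpw).1 r hr)).symm
      have hfilter : K'.filter (fun k => k.2 != q.2) = K' :=
        List.filter_eq_self.2 (fun r hr => by simpa using hne r hr)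
      have hhd : ((q :: K').map Prod.fst).erase q.1 = K'.map Prod.fst := by simp
      have hfc : (q :: K').filter (fun k => k.2 != q.2) = K'.filter (fun k => k.2 != q.2) :=
        List.filter_cons_of_neg (by simp)
      rw [hhd, hfc, hfilter]
    · have hpK' : p ∈ K' := by
        rcases List.mem_cons.1 hK.1 with h | h
        · exact absurd h (fun hh => hqp hh.symm)
        · exact h
      have hq2 : q.2 < p.2 := (List.pairwise_cons.1 hpw).1 p hpK'
      have hvlt : vLt p q := hK.2 q (by simp) hqp
      have hq1 : p.1 < q.1 := by rcases hvlt with h | ⟨_, h⟩ <;> omega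
      have hK' : KMin K' p :=
        ⟨hpK', fun r hr hrp => hK.2 r (by simp [hr]) hrp⟩
      have ih := erase_minval K' p hK' (List.pairwise_cons.1 hpw).2
      have hbne : (q.1 == p.1) = false := by simp; omega
      simp only [List.map_cons, List.erase_cons, hbne]
      have : (q.2 != p.2) = true := by simp; omega
      simp [this, ih]
  termination_by K => K.length

-- helper: two distinct members of a snd-strictly-increasing list have distinct indices
theorem ne_snd_of_pairwise {K : List (Int × Int)} (h : K.Pairwise (fun a b => a.2 < b.2))
    {p q : Int × Int} (hp : p ∈ K) (hq : q ∈ K) (hne : p ≠ q) : p.2 ≠ q.2 := by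
  have h' : K.Pairwise (fun a b => a.2 ≠ b.2) := h.imp (fun hab => ne_of_lt hab)
  exact h'.forall (fun _ _ hab => hab.symm) hp hq hne

theorem discard_scores_spec_aux (numlist : List Int) (hpre : Pre_discard_scores numlist) :
    discard_scores numlist = discard_scores_alt numlist := by
  have hlen : 2 ≤ (numlist.drop 2).length := by
    simp only [Pre_discard_scores] at hpre
    simp; omega
  obtain ⟨a, b, t, hs⟩ : ∃ a b t, numlist.drop 2 = a :: b :: t := by
    match h : numlist.drop 2 with
    | [] => rw [h] at hlen; simp at hlen
    | [x] => rw [h] at hlen; simp at hlen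
    | a :: b :: t => exact ⟨_, _, _, rfl⟩
  have hslice : PySem.List.slice numlist (some 2) none = a :: b :: t := by
    have h2 : PySem.List.slice numlist (some 2) none = numlist.drop ((2:Int).toNat) :=
      PySem.List.slice_from numlist (by norm_num)
    rw [h2]; simpa using hs
  -- the key list: (value, original index) for each remaining score
  have e := PySem.List.enumerate (a :: b :: t) 0
  set K : List (Int × Int) := (PySem.List.enumerate (a :: b :: t) 0).map (fun p => (p.2, p.1)) with hK
  set K' : List (Int × Int) := (PySem.List.enumerate t 2).map (fun p => (p.2, p.1)) with hK'
  have F1 : K.map Prod.fst = a :: b :: t := by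
    rw [hK, List.map_map]
    exact PySem.List.map_snd_enumerate _ _
  have F2 : K.Pairwise (fun x y => x.2 < y.2) := by
    rw [hK, List.pairwise_map]
    simpa using PySem.List.pairwise_lt_enumerate (a :: b :: t) 0
  have F3 : K = (a, 0) :: (b, 1) :: K' := by
    rw [hK, hK']
    simp [PySem.List.enumerate_cons]
  have F4 : ∀ k ∈ K', (2:Int) ≤ k.2 := by
    intro k hk
    rw [hK'] at hk
    rcases List.mem_map.1 hk with ⟨p, hp, rfl⟩
    rcases (PySem.List.mem_enumerate_iff _ _ _).1 hp with ⟨j, hj, rfl⟩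
    simp
  set I : (Int × Int) × (Int × Int) :=
    (if dsKeyLt (b, 1) (a, 0) then ((b, (1:Int)), (a, (0:Int)))
     else ((a, (0:Int)), (b, (1:Int)))) with hI
  have hinit : dsInv [(a, 0), (b, 1)] I := by
    have hne : ((b, (1:Int)) : Int × Int) ≠ ((a, (0:Int)) : Int × Int) := by simp
    rw [hI]
    by_cases hc : dsKeyLt (b, 1) (a, 0) = true
    · rw [if_pos hc]
      refine ⟨by simp, by simp, (dsKeyLt_iff _ _).1 hc, ?_⟩
      intro q hq hq1 hq2
      simp at hq
      rcases hq with rfl | rfl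
      · exact absurd rfl hq2
      · exact absurd rfl hq1
    · rw [if_neg (by simpa using hc)]
      refine ⟨by simp, by simp, vLt_total hne (by simpa [dsKeyLt_iff] using hc), ?_⟩
      intro q hq hq1 hq2
      simp at hq
      rcases hq with rfl | rfl
      · exact absurd rfl hq1
      · exact absurd rfl hq2
  set stF : (Int × Int) × (Int × Int) := K'.foldl dsUpd I with hstF
  have hfoldK : K.foldl dsUpd I = stF := by
    rw [F3]
    simp only [List.foldl_cons]
    have h1 : dsUpd I (a, 0) = I := by simp [dsUpd]
    have h2 : dsUpd I (b, 1) = I := by simp [dsUpd]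
    rw [h1, h2, hstF]
  have hInv : dsInv K stF := by
    rw [F3]
    have hpw' : ([((a:Int), (0:Int)), (b, 1)] ++ K').Pairwise (fun p q => p.2 ≠ q.2) := by
      have h : K.Pairwise (fun p q => p.2 ≠ q.2) := F2.imp (fun h => ne_of_lt h)
      rw [F3] at h
      exact h
    simpa using inv_fold K' [(a, 0), (b, 1)] I hpw' hinit F4
  set p1 := stF.1 with hp1
  set p2 := stF.2 with hp2
  have hp1p2 : vLt p1 p2 := hInv.2.2.1
  have hp1p2ne : p1 ≠ p2 := fun h => vLt_irrefl _ (h ▸ hp1p2)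
  have hKmin1 : KMin K p1 := by
    refine ⟨hInv.1, fun q hq hqne => ?_⟩
    by_cases hq2 : q = p2
    · exact hq2 ▸ hp1p2
    · exact vLt_trans hp1p2 (hInv.2.2.2 q hq hqne hq2)
  have hidx : p1.2 ≠ p2.2 := ne_snd_of_pairwise F2 hInv.1 hInv.2.1 hp1p2ne
  set K1 : List (Int × Int) := K.filter (fun k => k.2 != p1.2) with hK1
  have hK1min : KMin K1 p2 := by
    constructor
    · rw [hK1, List.mem_filter]
      exact ⟨hInv.2.1, by simpa using hidx.symm⟩
    · intro q hq hqne
      rw [hK1, List.mem_filter] at hq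
      have hq1 : q ≠ p1 := by
        intro h; rw [h] at hq; simp at hq
      exact hInv.2.2.2 q hq.1 hq1 hqne
  have hK1pw : K1.Pairwise (fun x y => x.2 < y.2) :=
    List.Pairwise.sublist List.filter_sublist F2
  -- A's first pass
  have hlow1 : (a :: b :: t).foldl dsMin a = p1.1 := by
    rw [← F1]
    exact foldl_eq_minval hKmin1 a (by rw [F1]; simp)
  have hmem1 : p1.1 ∈ (a :: b :: t) := by
    rw [← F1]; exact List.mem_map_of_mem hKmin1.1
  have hstep1 : dsStep (a :: b :: t) = some (K1.map Prod.fst) := by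
    unfold dsStep
    rw [PySem.List.pyGet?_zero_cons]
    show PySem.List.remove? (a :: b :: t) ((a :: b :: t).foldl dsMin a) = _
    rw [hlow1, PySem.List.remove?_eq_some_erase _ _ hmem1]
    rw [← F1, erase_minval K p1 hKmin1 F2]
  -- A's second pass
  obtain ⟨c, cs, hK1v⟩ : ∃ c cs, K1.map Prod.fst = c :: cs := by
    match h : K1.map Prod.fst with
    | [] =>
      exfalso
      have := List.mem_map_of_mem (f := Prod.fst) hK1min.1
      rw [h] at this; simp at this
    | c :: cs => exact ⟨c, cs, rfl⟩
  have hlow2 : (K1.map Prod.fst).foldl dsMin c = p2.1 :=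
    foldl_eq_minval hK1min c (by rw [hK1v]; simp)
  have hmem2 : p2.1 ∈ K1.map Prod.fst := List.mem_map_of_mem hK1min.1
  have hstep2 : dsStep (K1.map Prod.fst) =
      some ((K1.filter (fun k => k.2 != p2.2)).map Prod.fst) := by
    unfold dsStep
    rw [hK1v, PySem.List.pyGet?_zero_cons]
    show PySem.List.remove? (c :: cs) ((c :: cs).foldl dsMin c) = _
    rw [← hK1v, hlow2, PySem.List.remove?_eq_some_erase _ _ hmem2,
      erase_minval K1 p2 hK1min hK1pw]
  -- A's value
  have hrange : PySem.List.pyRange 0 2 1 = [0, 1] := by decide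
  have hA : discard_scores numlist =
      (K1.filter (fun k => k.2 != p2.2)).map Prod.fst := by
    unfold discard_scores
    rw [hrange, hslice]
    simp only [List.foldl_cons, List.foldl_nil]
    rw [show (some (a :: b :: t)).bind dsStep = dsStep (a :: b :: t) from rfl, hstep1]
    rw [show (some (K1.map Prod.fst)).bind dsStep = dsStep (K1.map Prod.fst) from rfl, hstep2]
    rfl
  -- B's value
  have hget1 : PySem.List.pyGet? (a :: b :: t) 1 = some b := by
    rw [show ((1:Int)) = ((1:Nat):Int) from rfl, PySem.List.pyGet?_natCast]
    rfl
  have hB : discard_scores_alt numlist =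
      ((PySem.List.enumerate (a :: b :: t) 0).filter
        (fun p => p.1 != p1.2 && p.1 != p2.2)).map Prod.snd := by
    have hfold : (PySem.List.enumerate (a :: b :: t) 0).foldl
        (fun st p => dsUpd st (p.2, p.1)) I = stF := by
      rw [← hfoldK, hK, List.foldl_map]
    unfold discard_scores_alt
    rw [hslice]
    simp only [PySem.List.pyGet?_zero_cons, hget1, ← hI, hfold]
    rfl
  rw [hA, hB]
  -- both are the K-filter on the two dropped indices
  have hff : K1.filter (fun k => k.2 != p2.2) =
      K.filter (fun k => k.2 != p1.2 && k.2 != p2.2) := by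
    rw [hK1, List.filter_filter]
    exact List.filter_congr (fun x _ => by rw [Bool.and_comm])
  rw [hff, hK, List.filter_map, List.map_map]
  apply List.map_congr_left
  intro x hx
  rfl

-- ===== VERDICT (by name: the statement is the Claim_ definition above) =====
theorem discard_scores_spec : Claim_equal_discard_scores := by
  intro numlist _ hpre
  exact discard_scores_spec_aux numlist hpre
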